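-- pv_equiv track=rewrite | github.com/katygorman/advent-of-code | 2025/day03/day03-part2.py | find_largest_num_and_index_recursive
-- ===== SOURCE A (Python) =====
-- def find_largest_num_and_index_recursive(str, index, max_num, max_index):
--     # Base case: if the end of the string is reached
--     if index == len(str):
--         return max_num, max_index
--
--     char = str[index]
--     num = int(char)
--
--     # If this digit is larger than the max, update
--     if num > max_num:
--         max_num = num
--         max_index = index
--
--     # Recursive call for the next character
--     return find_largest_num_and_index_recursive(str, index + 1, max_num, max_index)
-- ===== SOURCE B (Python) =====
-- def find_largest_num_and_index_recursive(str, index, max_num, max_index):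
--     # iterative rewrite: a while loop over the remaining positions, keeping the best (value, position) pair
--     best = (max_num, max_index)
--     i = index
--     while i != len(str):
--         num = int(str[i])
--         if num > best[0]:
--             best = (num, i)
--         i += 1
--     return best
-- ===== Notes on version B (the rewrite author's own statement) =====
-- stated objective: simpler
-- what changed: Replaces A's tail recursion (one call frame per character, threading two accumulator parameters through recursive calls) with a flat while loop over the positions that keeps a single running (value, position) pair.
import Mathlib
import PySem

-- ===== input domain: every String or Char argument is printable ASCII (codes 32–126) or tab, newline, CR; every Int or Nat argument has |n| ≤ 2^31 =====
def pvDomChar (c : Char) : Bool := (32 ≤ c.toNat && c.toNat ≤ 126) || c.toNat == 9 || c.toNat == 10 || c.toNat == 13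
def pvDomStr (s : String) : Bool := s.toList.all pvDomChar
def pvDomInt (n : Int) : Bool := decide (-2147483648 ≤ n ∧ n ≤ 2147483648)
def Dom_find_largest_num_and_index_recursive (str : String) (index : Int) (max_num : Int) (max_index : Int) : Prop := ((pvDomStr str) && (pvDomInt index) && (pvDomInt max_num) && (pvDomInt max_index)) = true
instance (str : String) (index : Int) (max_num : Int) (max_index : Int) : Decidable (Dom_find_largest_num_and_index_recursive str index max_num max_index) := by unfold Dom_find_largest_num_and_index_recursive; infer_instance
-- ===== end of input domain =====

-- B replaces A's tail recursion with a while loop keeping one (value, position) pair (objective: simpler).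

-- ===== PORT A =====
-- literal transliteration of A's tail recursion; where Python raises
-- (IndexError / ValueError) the port returns the current accumulators
def find_largest_num_and_index_recursive (str : String) (index : Int) (max_num : Int) (max_index : Int) : Int × Int :=
  if index = (PySem.Str.len str) then (max_num, max_index)
  else
    match h : PySem.List.pyGet? str.toList index with
    | none => (max_num, max_index)        -- Python: IndexError
    | some char =>
      match PySem.Int.ofChars? [char] with
      | none => (max_num, max_index)      -- Python: ValueError
      | some num =>
        if num > max_num then
          find_largest_num_and_index_recursive str (index + 1) num index
        else
          find_largest_num_and_index_recursive str (index + 1) max_num max_index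
termination_by (PySem.Str.len str - index).toNat
decreasing_by
  all_goals
  · have hin : PySem.Raise.InRange str.toList.length index := by
      by_contra hc
      rw [(PySem.List.pyGet?_eq_none_iff _ _).mpr hc] at h
      simp at h
    simp [PySem.Raise.InRange] at hin
    simp [PySem.Str.len_eq]
    omega

-- ===== PORT B =====
-- transliteration of Source B's while loop: state is the pair `best`, counter `i`;
-- where Python raises (IndexError / ValueError) the loop port returns the current `best`
def find_largest_loop (str : String) (i : Int) (best : Int × Int) : Int × Int :=
  if i = (PySem.Str.len str) then best
  else
    match h : PySem.List.pyGet? str.toList i with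
    | none => best                        -- Python: IndexError
    | some char =>
      match PySem.Int.ofChars? [char] with
      | none => best                      -- Python: ValueError
      | some num =>
        find_largest_loop str (i + 1) (if num > best.1 then (num, i) else best)
termination_by (PySem.Str.len str - i).toNat
decreasing_by
  · have hin : PySem.Raise.InRange str.toList.length i := by
      by_contra hc
      rw [(PySem.List.pyGet?_eq_none_iff _ _).mpr hc] at h
      simp at h
    simp [PySem.Raise.InRange] at hin
    simp [PySem.Str.len_eq]
    omega

def find_largest_num_and_index_recursive_alt (str : String) (index : Int) (max_num : Int) (max_index : Int) : Int × Int :=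
  find_largest_loop str index (max_num, max_index)

-- ===== PRECONDITION & SPEC =====
-- Pre_ excludes exactly the inputs on which Python A raises: index outside [-len, len]
-- (IndexError: the base case is never reached) or a visited character on which int() fails
-- (ValueError). Python B raises at the same inputs; the two ports agree even outside Pre_.
def Pre_find_largest_num_and_index_recursive (str : String) (index : Int) (max_num : Int) (max_index : Int) : Prop :=
  -(str.toList.length : Int) ≤ index ∧ index ≤ (str.toList.length : Int) ∧
  (str.toList.drop index.toNat).all (fun c => (PySem.Int.ofChars? [c]).isSome) = true
instance (str : String) (index : Int) (max_num : Int) (max_index : Int) : Decidable (Pre_find_largest_num_and_index_recursive str index max_num max_index) := by unfold Pre_find_largest_num_and_index_recursive; infer_instance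

def pvWitness_find_largest_num_and_index_recursive : String × Int × Int × Int := ("2719", 0, -1, -1)

def Spec_find_largest_num_and_index_recursive (str : String) (index : Int) (max_num : Int) (max_index : Int) (out : Int × Int) : Prop := out = find_largest_num_and_index_recursive_alt str index max_num max_index
instance (str : String) (index : Int) (max_num : Int) (max_index : Int) (out : Int × Int) : Decidable (Spec_find_largest_num_and_index_recursive str index max_num max_index out) := by unfold Spec_find_largest_num_and_index_recursive; infer_instance

-- ===== CLAIM (what is proved, stated in full; the proofs are below) =====
def Claim_equal_find_largest_num_and_index_recursive : Prop := ∀ (str : String) (index : Int) (max_num : Int) (max_index : Int), Dom_find_largest_num_and_index_recursive str index max_num max_index → Pre_find_largest_num_and_index_recursive str index max_num max_index → Spec_find_largest_num_and_index_recursive str index max_num max_index (find_largest_num_and_index_recursive str index max_num max_index)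

-- ===== LEMMAS AND PROOFS =====

theorem find_largest_eq (str : String) (index : Int) (max_num : Int) (max_index : Int) :
    find_largest_num_and_index_recursive str index max_num max_index
      = find_largest_loop str index (max_num, max_index) := by
  fun_induction find_largest_num_and_index_recursive str index max_num max_index with
  | case1 mn mi =>
    rw [find_largest_loop]
    simp
  | case2 index mn mi hne hnone =>
    rw [find_largest_loop, if_neg (by simpa [PySem.Str.len_eq] using hne)]
    split <;> simp_all
  | case3 index mn mi hne char hget hint =>
    rw [find_largest_loop, if_neg (by simpa [PySem.Str.len_eq] using hne)]
    split <;> simp_all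
  | case4 index mn mi hne char hget num hint hgt ih =>
    rw [ih]; clear ih
    conv_rhs => rw [find_largest_loop]
    rw [if_neg (by simpa [PySem.Str.len_eq] using hne)]
    split <;> simp_all
  | case5 index mn mi hne char hget num hint hle ih =>
    rw [ih]; clear ih
    conv_rhs => rw [find_largest_loop]
    rw [if_neg (by simpa [PySem.Str.len_eq] using hne)]
    split <;> simp_all
    rw [if_neg (by omega)]

-- ===== VERDICT (by name: the statement is the Claim_ definition above) =====
theorem find_largest_num_and_index_recursive_spec : Claim_equal_find_largest_num_and_index_recursive := by
  intro str index max_num max_index _ _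
  exact find_largest_eq str index max_num max_index
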